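-- pv_equiv track=rewrite | github.com/yaigorian/python_mipt_dafe_tasks_sem2 | solutions/sem01/lesson02/task4.py | get_multiplications_amount
-- ===== SOURCE A (Python) =====
-- def get_multiplications_amount(deg: int) -> int:
--     multiplications_amount = 0
--     while deg > 1:
--         if deg % 2 == 0:
--             deg = deg // 2
--         else:
--             deg -= 1
--         multiplications_amount += 1
--     return multiplications_amount
-- ===== SOURCE B (Python) =====
-- def get_multiplications_amount(deg: int) -> int:
--     if deg <= 1:
--         return 0
--     return deg.bit_length() + bin(deg).count('1') - 2
-- ===== Notes on version B (the rewrite author's own statement) =====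
-- stated objective: simpler
-- what changed: Replaces the step-by-step halve/decrement loop with a direct closed-form computation from the bit length and popcount of deg, guarded by the loop's natural base case.
import Mathlib
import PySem

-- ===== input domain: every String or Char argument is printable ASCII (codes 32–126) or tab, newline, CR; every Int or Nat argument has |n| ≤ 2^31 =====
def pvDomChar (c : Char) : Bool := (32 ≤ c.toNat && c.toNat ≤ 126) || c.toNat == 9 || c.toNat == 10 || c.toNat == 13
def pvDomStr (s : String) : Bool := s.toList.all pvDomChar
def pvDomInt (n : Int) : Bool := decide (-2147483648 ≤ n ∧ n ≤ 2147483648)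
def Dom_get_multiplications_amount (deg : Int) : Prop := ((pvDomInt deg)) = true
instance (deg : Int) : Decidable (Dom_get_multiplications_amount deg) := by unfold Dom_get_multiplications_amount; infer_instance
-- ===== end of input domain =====

-- B replaces A's halve/decrement loop by a closed form from bit length and popcount (objective: simpler; no loop).

-- ===== PORT A =====
-- the while loop of A, with the running counter as accumulator
def gmaLoop (deg : Int) (acc : Int) : Int :=
  if h : 1 < deg then
    if PySem.Int.mod deg 2 = 0 then gmaLoop (PySem.Int.floordiv deg 2) (acc + 1)
    else gmaLoop (deg - 1) (acc + 1)
  else acc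
termination_by deg.toNat
decreasing_by
  · rw [PySem.Int.floordiv_eq_ediv_of_pos (by omega)]; omega
  · omega

def get_multiplications_amount (deg : Int) : Int := gmaLoop deg 0

-- ===== PORT B =====
-- deg.bit_length() → PySem.Int.bitLength; bin(deg).count('1') → PySem.Int.bitCount
-- (exact here: on the branch taken deg > 1, where bin(deg) has no sign and bitCount is the popcount)
def get_multiplications_amount_alt (deg : Int) : Int :=
  if deg ≤ 1 then 0
  else (PySem.Int.bitLength deg : Int) + (PySem.Int.bitCount deg : Int) - 2

-- ===== PRECONDITION & SPEC =====
def Spec_get_multiplications_amount (deg : Int) (out : Int) : Prop := out = get_multiplications_amount_alt deg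
instance (deg : Int) (out : Int) : Decidable (Spec_get_multiplications_amount deg out) := by unfold Spec_get_multiplications_amount; infer_instance

-- ===== CLAIM (what is proved, stated in full; the proofs are below) =====
def Claim_equal_get_multiplications_amount : Prop := ∀ (deg : Int), Dom_get_multiplications_amount deg → Spec_get_multiplications_amount deg (get_multiplications_amount deg)

-- ===== LEMMAS AND PROOFS =====

-- closed form of A's loop, by strong induction on the (nonnegative) argument
lemma gmaLoop_closed : ∀ n : Nat, ∀ acc : Int,
    gmaLoop (n : Int) acc =
      acc + (if (n : Int) ≤ 1 then 0 else (PySem.Int.bitLength (n : Int) : Int) + (PySem.Int.bitCount (n : Int) : Int) - 2) := by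
  intro n
  induction n using Nat.strong_induction_on with
  | _ n ih =>
    intro acc
    by_cases h1 : (n : Int) ≤ 1
    · rw [gmaLoop]
      simp [show ¬ (1 < (n : Int)) by omega, h1]
    · have hn2 : 2 ≤ n := by omega
      have hbl := PySem.Int.bitLength_natCast (m := n) (by omega)
      have hbc := PySem.Int.bitCount_natCast (m := n) (by omega)
      have hmodc : PySem.Int.mod (n : Int) 2 = ((n % 2 : Nat) : Int) := by
        exact_mod_cast PySem.Int.mod_natCast n 2
      rw [gmaLoop, dif_pos (show (1:Int) < (n:Int) by omega), if_neg h1]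
      by_cases hev : PySem.Int.mod (n : Int) 2 = 0
      · -- even branch
        have hm0 : n % 2 = 0 := by
          rw [hmodc] at hev; exact_mod_cast hev
        have hfd : PySem.Int.floordiv (n : Int) 2 = ((n / 2 : Nat) : Int) := by
          exact_mod_cast PySem.Int.floordiv_natCast n 2
        rw [if_pos hev, hfd, ih (n / 2) (by omega)]
        rcases Nat.lt_or_ge (n / 2) 2 with hq | hq
        · -- n = 2
          have hq1 : n / 2 = 1 := by omega
          have hb1 : PySem.Int.bitLength (((1:Nat) : Int)) = 1 := by decide
          have hc1 : PySem.Int.bitCount (((1:Nat) : Int)) = 1 := by decide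
          rw [hq1] at hbl hbc ⊢
          rw [if_pos (by exact_mod_cast Nat.le_refl 1), hbl, hbc, hb1, hc1, hm0]
          push_cast
          ring
        · rw [if_neg (by exact_mod_cast (by omega : ¬ ((n/2 : Nat) ≤ 1)))]
          rw [hbl, hbc, hm0]
          push_cast
          ring
      · -- odd branch
        have hm1 : n % 2 = 1 := by
          rw [hmodc] at hev
          omega
        have hsub : (n : Int) - 1 = ((n - 1 : Nat) : Int) := by omega
        rw [if_neg hev, hsub, ih (n - 1) (by omega)]
        have hn3 : 3 ≤ n := by omega
        rw [if_neg (by exact_mod_cast (by omega : ¬ ((n - 1 : Nat) ≤ 1)))]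
        have hbl' := PySem.Int.bitLength_natCast (m := n - 1) (by omega)
        have hbc' := PySem.Int.bitCount_natCast (m := n - 1) (by omega)
        have hhalf : (n - 1) / 2 = n / 2 := by omega
        rw [hhalf] at hbl' hbc'
        rw [hbl, hbc, hbl', hbc', hm1, show (n - 1) % 2 = 0 by omega]
        push_cast
        ring

-- ===== VERDICT (by name: the statement is the Claim_ definition above) =====
theorem get_multiplications_amount_spec : Claim_equal_get_multiplications_amount := by
  intro deg _
  unfold Spec_get_multiplications_amount get_multiplications_amount get_multiplications_amount_alt
  by_cases h1 : deg ≤ 1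
  · rw [gmaLoop, dif_neg (by omega), if_pos h1]
  · have hcast : ((deg.toNat : Nat) : Int) = deg := Int.toNat_of_nonneg (by omega)
    rw [if_neg h1, ← hcast, gmaLoop_closed deg.toNat 0,
        if_neg (by rw [hcast]; exact h1)]
    ring
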